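-- pv_equiv track=rewrite | github.com/linusg/adventofcode | 2020/6.py | solve_part2
-- ===== SOURCE A (Python) =====
-- from typing import Iterable, List
--
-- def solve_part2(quiz_answers: Iterable[Iterable[str]]) -> int:
--     return sum(
--         len(
--             set(
--                 c
--                 for answer in group_answers
--                 for c in answer
--                 if all(c in answer for answer in group_answers)
--             )
--         )
--         for group_answers in quiz_answers
--     )
-- ===== SOURCE B (Python) =====
-- def solve_part2(quiz_answers):
--     total = 0
--     for group_answers in quiz_answers:
--         group = list(group_answers)
--         if group:
--             common = set(group[0])
--             for answer in group[1:]: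
--                 common &= set(answer)
--             total += len(common)
--     return total
-- ===== Notes on version B (the rewrite author's own statement) =====
-- stated objective: faster
-- what changed: Replaces the per-character scan of every answer (an all(...) over the whole group for each character occurrence) with a left fold of set intersections starting from the first answer's character set.
import Mathlib
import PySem

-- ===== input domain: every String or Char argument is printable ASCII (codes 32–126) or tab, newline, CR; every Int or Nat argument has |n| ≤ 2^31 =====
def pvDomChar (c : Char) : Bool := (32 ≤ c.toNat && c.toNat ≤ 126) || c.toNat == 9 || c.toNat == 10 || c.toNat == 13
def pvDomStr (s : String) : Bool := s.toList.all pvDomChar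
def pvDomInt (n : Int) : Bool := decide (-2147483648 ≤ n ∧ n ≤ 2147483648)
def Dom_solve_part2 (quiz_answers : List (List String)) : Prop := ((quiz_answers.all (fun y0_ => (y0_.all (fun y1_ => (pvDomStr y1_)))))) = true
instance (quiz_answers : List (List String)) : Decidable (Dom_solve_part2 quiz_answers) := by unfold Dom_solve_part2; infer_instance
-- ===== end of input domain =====

-- B replaces A's per-character full-group scan with a fold of set intersections per group (asymptotically faster).


-- ===== PORT A =====
-- sum( len(set(c for answer in group for c in answer if all(c in answer2 for answer2 in group))) for group in quiz_answers )
-- ('c in answer' on a single character is char membership in the string's characters)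
def solve_part2 (quiz_answers : List (List String)) : Int :=
  (quiz_answers.map (fun group_answers =>
    ((PySem.Set.ofList
      (((group_answers.flatMap (fun answer => answer.toList))).filter
        (fun c => group_answers.all (fun answer => answer.toList.contains c)))).length : Int))).sum

-- ===== PORT B =====
def solve_part2_alt (quiz_answers : List (List String)) : Int :=
  quiz_answers.foldl (fun total group =>
    match group with
    | [] => total
    | a :: rest =>
        total + ((rest.foldl (fun common answer =>
            PySem.Set.inter common (PySem.Set.ofList answer.toList))
          (PySem.Set.ofList a.toList)).length : Int)) 0

-- ===== PRECONDITION & SPEC =====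
def Spec_solve_part2 (quiz_answers : List (List String)) (out : Int) : Prop := out = solve_part2_alt quiz_answers
instance (quiz_answers : List (List String)) (out : Int) : Decidable (Spec_solve_part2 quiz_answers out) := by unfold Spec_solve_part2; infer_instance

-- ===== CLAIM (what is proved, stated in full; the proofs are below) =====
def Claim_equal_solve_part2 : Prop := ∀ (quiz_answers : List (List String)), Dom_solve_part2 quiz_answers → Spec_solve_part2 quiz_answers (solve_part2 quiz_answers)

-- ===== LEMMAS AND PROOFS =====

lemma mem_fold_inter (rest : List String) (s : PySem.Set Char) (c : Char) :
    (c ∈ rest.foldl (fun common answer =>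
        PySem.Set.inter common (PySem.Set.ofList answer.toList)) s)
      ↔ c ∈ s ∧ ∀ ans ∈ rest, c ∈ ans.toList := by
  induction rest generalizing s with
  | nil => simp
  | cons x xs ih =>
      simp [List.foldl, ih, PySem.Set.mem_inter, PySem.Set.mem_ofList]
      tauto

lemma nodup_fold_inter (rest : List String) (s : PySem.Set Char) (hs : s.Nodup) :
    (rest.foldl (fun common answer =>
        PySem.Set.inter common (PySem.Set.ofList answer.toList)) s).Nodup := by
  induction rest generalizing s with
  | nil => exact hs
  | cons x xs ih => exact ih _ (PySem.Set.nodup_inter _ _ hs)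

lemma group_eq (group : List String) :
    ((PySem.Set.ofList
      (((group.flatMap (fun answer => answer.toList))).filter
        (fun c => group.all (fun answer => answer.toList.contains c)))).length : Int)
    = (match group with
       | [] => (0 : Int)
       | a :: rest =>
           ((rest.foldl (fun common answer =>
               PySem.Set.inter common (PySem.Set.ofList answer.toList))
             (PySem.Set.ofList a.toList)).length : Int)) := by
  cases group with
  | nil => simp [PySem.Set.ofList]
  | cons a rest =>
      have hperm : (PySem.Set.ofList
          ((((a :: rest).flatMap (fun answer => answer.toList))).filter
            (fun c => (a :: rest).all (fun answer => answer.toList.contains c)))).Perm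
          (rest.foldl (fun common answer =>
              PySem.Set.inter common (PySem.Set.ofList answer.toList))
            (PySem.Set.ofList a.toList)) := by
        refine (List.perm_ext_iff_of_nodup (PySem.Set.nodup_ofList _)
          (nodup_fold_inter _ _ (PySem.Set.nodup_ofList _))).2 ?_
        intro c
        rw [mem_fold_inter]
        simp only [PySem.Set.mem_ofList, List.mem_filter, List.mem_flatMap,
          List.all_eq_true, List.contains_iff_mem,
          List.mem_cons]
        constructor
        · rintro ⟨-, hall⟩
          exact ⟨hall a (Or.inl rfl), fun x hx => hall x (Or.inr hx)⟩
        · rintro ⟨ha, hrest⟩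
          refine ⟨⟨a, Or.inl rfl, ha⟩, ?_⟩
          intro x hx
          rcases hx with rfl | hx
          · exact ha
          · exact hrest x hx
      have h := congrArg (fun n : Nat => (n : Int)) hperm.length_eq
      simpa using h

lemma alt_eq_sum (quiz_answers : List (List String)) (t : Int) :
    quiz_answers.foldl (fun total group =>
      match group with
      | [] => total
      | a :: rest =>
          total + ((rest.foldl (fun common answer =>
              PySem.Set.inter common (PySem.Set.ofList answer.toList))
            (PySem.Set.ofList a.toList)).length : Int)) t
    = t + (quiz_answers.map (fun group =>
        (match group with
         | [] => (0 : Int)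
         | a :: rest =>
             ((rest.foldl (fun common answer =>
                 PySem.Set.inter common (PySem.Set.ofList answer.toList))
               (PySem.Set.ofList a.toList)).length : Int)))).sum := by
  induction quiz_answers generalizing t with
  | nil => simp
  | cons g gs ih =>
      cases g with
      | nil => simp [List.foldl, ih]
      | cons a rest => simp [List.foldl, ih]; ring

-- ===== VERDICT (by name: the statement is the Claim_ definition above) =====
theorem solve_part2_spec : Claim_equal_solve_part2 := by
  intro qa _
  unfold Spec_solve_part2 solve_part2 solve_part2_alt
  rw [alt_eq_sum, zero_add]
  congr 1
  exact List.map_congr_left (fun g _ => group_eq g)
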